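-- pv_equiv track=rewrite | github.com/xxooxx99/xogus_algorithm_py | 프로그래머스/2/250136. ［PCCP 기출문제］ 2번 ／ 석유 시추/［PCCP 기출문제］ 2번 ／ 석유 시추.py | calculate_oil_by_column
-- ===== SOURCE A (Python) =====
-- def calculate_oil_by_column(land, clusters, cluster_map):
--     n, m = len(land), len(land[0]) #땅의 크기를 저장
--     max_oil = 0 # 최대 석유량을 저장할 변수를 초기화
--
--     for col in range(m):
--         visited_clusters = set() #이미 방문한 클러스터를 위한 집합을 초기화
--         oil_amount = 0 #현재 열에서 얻을수 있는 석유랑 초기화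
--         for row in range(n):
--             if cluster_map[row][col] != -1: #클러스터가 있는지 확인
--                 cluster_idx = cluster_map[row][col] #클러스터 인덱스를 가져옴
--                 if cluster_idx not in visited_clusters: #해당 클러스터를 이미 방문했는지 확인
--                     oil_amount += clusters[cluster_idx] #석유량을더함
--                     visited_clusters.add(cluster_idx) #방문한 클러스터를 집합에 추가
--         max_oil = max(max_oil, oil_amount) # 최대 석유량 갱신
--
--     return max_oil #최대 석유량을 반환
-- ===== SOURCE B (Python) =====
-- def calculate_oil_by_column(land, clusters, cluster_map):
--     n, m = len(land), len(land[0])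
--     occ = set()
--     for row in range(n):
--         for col in range(m):
--             idx = cluster_map[row][col]
--             if idx != -1:
--                 occ.add((col, idx))
--     totals = [0] * m
--     for col, idx in occ:
--         totals[col] += clusters[idx]
--     return max([0] + totals)
-- ===== Notes on version B (the rewrite author's own statement) =====
-- stated objective: alternative
-- what changed: Replaces the per-column loop with its own visited-set and running max by a single row-major pass that collects the deduplicating set of (column, cluster) pairs, a second pass accumulating a per-column totals array from that set, and a final max([0]+totals).
import Mathlib
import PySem

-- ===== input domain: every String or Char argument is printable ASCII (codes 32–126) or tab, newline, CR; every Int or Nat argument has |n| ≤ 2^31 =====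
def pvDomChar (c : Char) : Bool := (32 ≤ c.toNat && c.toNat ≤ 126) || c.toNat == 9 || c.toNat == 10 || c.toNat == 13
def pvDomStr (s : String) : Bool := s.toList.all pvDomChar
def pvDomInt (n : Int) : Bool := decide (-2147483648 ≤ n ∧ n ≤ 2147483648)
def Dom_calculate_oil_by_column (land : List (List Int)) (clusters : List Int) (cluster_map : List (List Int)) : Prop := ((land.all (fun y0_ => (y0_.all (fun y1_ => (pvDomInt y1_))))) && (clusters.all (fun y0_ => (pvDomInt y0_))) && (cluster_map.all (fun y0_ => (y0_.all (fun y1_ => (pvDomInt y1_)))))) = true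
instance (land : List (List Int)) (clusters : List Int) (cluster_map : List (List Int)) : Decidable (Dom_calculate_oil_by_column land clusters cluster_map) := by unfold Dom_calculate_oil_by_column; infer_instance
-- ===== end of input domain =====

-- B replaces A's column-by-column scan (per-column visited set + running max) by one row-major pass
-- collecting the deduplicating set of (column, cluster) pairs, a totals-array pass over that set,
-- and a final max([0]+totals); objective: alternative decomposition, same asymptotic cost.

-- cluster_map[row][col], totalized (Pre_ guarantees the lookup succeeds)
def pvCell (cm : List (List Int)) (r c : Int) : Int :=
  (((PySem.List.pyGet? cm r).bind (fun rw => PySem.List.pyGet? rw c)).getD 0)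

-- clusters[i] with Python's negative-index rule, totalized (Pre_ guarantees success)
def pvClus (clusters : List Int) (i : Int) : Int := (PySem.List.pyGet? clusters i).getD 0

-- body of A's inner row loop (visited set, oil amount)
def pvStepA (clusters : List Int) (cm : List (List Int)) (col : Int)
    (p : PySem.Set Int × Int) (row : Int) : PySem.Set Int × Int :=
  if pvCell cm row col ≠ -1 then
    let cluster_idx := pvCell cm row col
    if !(PySem.Set.contains p.1 cluster_idx) then
      (PySem.Set.add p.1 cluster_idx, p.2 + pvClus clusters cluster_idx)
    else p
  else p

-- ===== PORT A =====
def calculate_oil_by_column (land : List (List Int)) (clusters : List Int) (cluster_map : List (List Int)) : Int :=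
  let n : Int := land.length
  let m : Int := (land.headD []).length
  (PySem.List.pyRange 0 m 1).foldl (fun max_oil col =>
    let st := (PySem.List.pyRange 0 n 1).foldl (pvStepA clusters cluster_map col)
      ((PySem.Set.empty : PySem.Set Int), 0)
    max max_oil st.2) 0

-- body of B's collection loop: record (col, idx) for a non-(-1) cell
def pvStepB (cm : List (List Int)) (row : Int)
    (s : PySem.Set (Int × Int)) (col : Int) : PySem.Set (Int × Int) :=
  let idx := pvCell cm row col
  if idx ≠ -1 then PySem.Set.add s (col, idx) else s

-- body of B's totals loop: totals[col] += clusters[idx]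
def pvStepT (clusters : List Int) (t : List Int) (p : Int × Int) : List Int :=
  PySem.List.pySetD t p.1 (PySem.List.pyGetD t p.1 0 + pvClus clusters p.2)

-- ===== PORT B =====
def calculate_oil_by_column_alt (land : List (List Int)) (clusters : List Int) (cluster_map : List (List Int)) : Int :=
  let n : Int := land.length
  let m : Int := (land.headD []).length
  let occ : PySem.Set (Int × Int) :=
    (PySem.List.pyRange 0 n 1).foldl (fun s row =>
      (PySem.List.pyRange 0 m 1).foldl (pvStepB cluster_map row) s)
      (PySem.Set.empty : PySem.Set (Int × Int))
  let totals : List Int := occ.foldl (pvStepT clusters) (List.replicate m.toNat 0)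
  (PySem.List.max? ([0] ++ totals) (fun x => x)).getD 0

-- ===== PRECONDITION & SPEC =====
-- one (row, col) cell of the window is fine if it exists and, when ≠ -1, indexes clusters
def pvCellOk (clusters : List Int) (cm : List (List Int)) (r c : Int) : Bool :=
  match (PySem.List.pyGet? cm r).bind (fun rw => PySem.List.pyGet? rw c) with
  | none => false
  | some v => v == -1 || (PySem.List.pyGet? clusters v).isSome

-- exactly the inputs where the Python A returns: land nonempty, and every cluster_map cell of the
-- n×m window exists with each non-(-1) value a valid (possibly negative) index into clusters
def Pre_calculate_oil_by_column (land : List (List Int)) (clusters : List Int) (cluster_map : List (List Int)) : Prop :=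
  land ≠ [] ∧
  ∀ r ∈ List.range land.length,
    ∀ c ∈ List.range (land.headD []).length,
      pvCellOk clusters cluster_map (r : Int) (c : Int) = true
instance (land : List (List Int)) (clusters : List Int) (cluster_map : List (List Int)) : Decidable (Pre_calculate_oil_by_column land clusters cluster_map) := by unfold Pre_calculate_oil_by_column; infer_instance

def pvWitness_calculate_oil_by_column : List (List Int) × List Int × List (List Int) :=
  ([[0, 0], [0, 0]], [10, 5], [[0, -1], [0, 1]])

def Spec_calculate_oil_by_column (land : List (List Int)) (clusters : List Int) (cluster_map : List (List Int)) (out : Int) : Prop := out = calculate_oil_by_column_alt land clusters cluster_map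
instance (land : List (List Int)) (clusters : List Int) (cluster_map : List (List Int)) (out : Int) : Decidable (Spec_calculate_oil_by_column land clusters cluster_map out) := by unfold Spec_calculate_oil_by_column; infer_instance

-- ===== CLAIM (what is proved, stated in full; the proofs are below) =====
def Claim_equal_calculate_oil_by_column : Prop := ∀ (land : List (List Int)) (clusters : List Int) (cluster_map : List (List Int)), Dom_calculate_oil_by_column land clusters cluster_map → Pre_calculate_oil_by_column land clusters cluster_map → Spec_calculate_oil_by_column land clusters cluster_map (calculate_oil_by_column land clusters cluster_map)

-- ===== LEMMAS AND PROOFS =====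

-- the distinct non-(-1) cluster ids of column c, as a Finset, and their total oil
def pvColFS (cm : List (List Int)) (n c : Int) : Finset Int :=
  (((PySem.List.pyRange 0 n 1).map (fun r => pvCell cm r c)).filter (· ≠ -1)).toFinset

def pvS (clusters : List Int) (cm : List (List Int)) (n c : Int) : Int :=
  ∑ v ∈ pvColFS cm n c, pvClus clusters v

theorem pvStepA_eq (clusters : List Int) (cm : List (List Int)) (col : Int)
    (p : PySem.Set Int × Int) (row : Int) :
    pvStepA clusters cm col p row =
      if pvCell cm row col = -1 then p
      else if pvCell cm row col ∈ p.1 then p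
      else (PySem.Set.add p.1 (pvCell cm row col), p.2 + pvClus clusters (pvCell cm row col)) := by
  simp only [pvStepA]
  by_cases h : pvCell cm row col = -1 <;>
    by_cases h2 : pvCell cm row col ∈ p.1 <;>
      simp [h, h2]

-- A's inner loop: visited-set invariant, generic over the list of column values
theorem pvA_inner (clusters : List Int) (cm : List (List Int)) (col : Int) (R : List Int) :
    ∀ (s : PySem.Set Int) (amt : Int), s.Nodup →
    (R.foldl (pvStepA clusters cm col) (s, amt)).1.Nodup ∧
    (R.foldl (pvStepA clusters cm col) (s, amt)).1.toFinset =
      s.toFinset ∪ ((R.map (fun r => pvCell cm r col)).filter (· ≠ -1)).toFinset ∧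
    (R.foldl (pvStepA clusters cm col) (s, amt)).2 =
      amt + ∑ v ∈ ((R.map (fun r => pvCell cm r col)).filter (· ≠ -1)).toFinset \ s.toFinset,
        pvClus clusters v := by
  induction R with
  | nil => intro s amt hs; simp [hs]
  | cons r R ih =>
    intro s amt hs
    simp only [List.foldl_cons, List.map_cons]
    rw [pvStepA_eq]
    by_cases h : pvCell cm r col = -1
    · simpa [h] using ih s amt hs
    · have hfc : ((pvCell cm r col :: R.map (fun r => pvCell cm r col)).filter (· ≠ -1)).toFinset
          = insert (pvCell cm r col) ((R.map (fun r => pvCell cm r col)).filter (· ≠ -1)).toFinset := by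
        simp [h]
      by_cases h2 : pvCell cm r col ∈ s
      · obtain ⟨ha, hb, hc⟩ := ih s amt hs
        rw [if_neg h, if_pos h2]
        refine ⟨ha, ?_, ?_⟩
        · rw [hfc, Finset.union_insert,
            Finset.insert_eq_self.mpr (Finset.mem_union_left _ (List.mem_toFinset.mpr h2))]
          exact hb
        · rw [hfc, Finset.insert_sdiff_of_mem _ (List.mem_toFinset.mpr h2)]
          exact hc
      · have hadd : (PySem.Set.add s (pvCell cm r col)).toFinset = insert (pvCell cm r col) s.toFinset := by
          rw [PySem.Set.add_of_not_mem h2]; ext x; simp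
        obtain ⟨ha, hb, hc⟩ := ih (PySem.Set.add s (pvCell cm r col)) (amt + pvClus clusters (pvCell cm r col))
          (PySem.Set.nodup_add _ _ hs)
        rw [hadd] at hb hc
        rw [if_neg h, if_neg h2]
        refine ⟨ha, ?_, ?_⟩
        · rw [hb, hfc, Finset.insert_union, Finset.union_insert]
        · have key : insert (pvCell cm r col) ((R.map (fun r => pvCell cm r col)).filter (· ≠ -1)).toFinset \ s.toFinset
              = insert (pvCell cm r col)
                  (((R.map (fun r => pvCell cm r col)).filter (· ≠ -1)).toFinset \ insert (pvCell cm r col) s.toFinset) := by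
            ext x
            simp only [Finset.mem_sdiff, Finset.mem_insert]
            constructor
            · rintro ⟨rfl | hx, hxs⟩
              · tauto
              · by_cases hxe : x = pvCell cm r col <;> tauto
            · rintro (rfl | ⟨⟨hx1, hx2⟩⟩)
              · exact ⟨Or.inl rfl, h2 ∘ List.mem_toFinset.mp⟩
              · exact ⟨Or.inr hx1, fun hxs => hx2 (Or.inr hxs)⟩
        -- note: membership in s.toFinset vs list membership
          rw [hc, hfc, key, Finset.sum_insert (by simp)]
          ring

-- B's inner collection loop: membership
theorem pvB_inner_mem (cm : List (List Int)) (row : Int) (C : List Int) :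
    ∀ (s : PySem.Set (Int × Int)) (q : Int × Int),
    (q ∈ C.foldl (pvStepB cm row) s ↔
      q ∈ s ∨ (q.1 ∈ C ∧ q.2 ≠ -1 ∧ pvCell cm row q.1 = q.2)) := by
  induction C with
  | nil => intro s q; simp
  | cons c C ih =>
    intro s q
    simp only [List.foldl_cons]
    rw [ih]
    simp only [pvStepB]
    by_cases h : pvCell cm row c = -1
    · rw [if_neg (by simp [h])]
      constructor
      · rintro (hq | hq) <;> simp_all
      · rintro (hq | ⟨h1, h2, h3⟩)
        · left; exact hq
        · rcases List.mem_cons.mp h1 with rfl | h1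
          · exact (h2 (by rw [← h3, h])).elim
          · right; exact ⟨h1, h2, h3⟩
    · rw [if_pos (by simp [h])]
      rw [PySem.Set.mem_add]
      constructor
      · rintro ((hq | rfl) | hq)
        · left; exact hq
        · right; exact ⟨List.mem_cons_self .., h, rfl⟩
        · right; exact ⟨List.mem_cons_of_mem _ hq.1, hq.2.1, hq.2.2⟩
      · rintro (hq | ⟨h1, h2, h3⟩)
        · left; left; exact hq
        · rcases List.mem_cons.mp h1 with rfl | h1
          · left; right; exact Prod.ext_iff.mpr ⟨rfl, h3.symm⟩
          · right; exact ⟨h1, h2, h3⟩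

theorem pvB_inner_nodup (cm : List (List Int)) (row : Int) (C : List Int) :
    ∀ (s : PySem.Set (Int × Int)), s.Nodup → (C.foldl (pvStepB cm row) s).Nodup := by
  induction C with
  | nil => intro s hs; simpa using hs
  | cons c C ih =>
    intro s hs
    simp only [List.foldl_cons]
    apply ih
    simp only [pvStepB]
    split
    · exact PySem.Set.nodup_add _ _ hs
    · exact hs

-- B's outer collection loop: membership and nodup
theorem pvB_occ_mem (cm : List (List Int)) (C : List Int) (R : List Int) :
    ∀ (s : PySem.Set (Int × Int)) (q : Int × Int),
    (q ∈ R.foldl (fun s row => C.foldl (pvStepB cm row) s) s ↔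
      q ∈ s ∨ (q.1 ∈ C ∧ q.2 ≠ -1 ∧ ∃ r ∈ R, pvCell cm r q.1 = q.2)) := by
  induction R with
  | nil => intro s q; simp
  | cons r R ih =>
    intro s q
    simp only [List.foldl_cons]
    rw [ih, pvB_inner_mem]
    constructor
    · rintro ((hq | ⟨h1, h2, h3⟩) | ⟨h1, h2, r', hr', h3⟩)
      · left; exact hq
      · right; exact ⟨h1, h2, r, List.mem_cons_self .., h3⟩
      · right; exact ⟨h1, h2, r', List.mem_cons_of_mem _ hr', h3⟩
    · rintro (hq | ⟨h1, h2, r', hr', h3⟩)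
      · left; left; exact hq
      · rcases List.mem_cons.mp hr' with rfl | hr'
        · left; right; exact ⟨h1, h2, h3⟩
        · right; exact ⟨h1, h2, r', hr', h3⟩

theorem pvB_occ_nodup (cm : List (List Int)) (C : List Int) (R : List Int) :
    ∀ (s : PySem.Set (Int × Int)), s.Nodup →
      (R.foldl (fun s row => C.foldl (pvStepB cm row) s) s).Nodup := by
  induction R with
  | nil => intro s hs; simpa using hs
  | cons r R ih =>
    intro s hs
    simp only [List.foldl_cons]
    exact ih _ (pvB_inner_nodup cm r C s hs)

-- the totals loop: each slot accumulates the pvClus-sum of its column's pairs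
theorem pvB_totals (clusters : List Int) (P : List (Int × Int)) :
    ∀ (t0 : List Int), (∀ p ∈ P, 0 ≤ p.1 ∧ p.1 < (t0.length : Int)) →
    (P.foldl (pvStepT clusters) t0).length = t0.length ∧
    ∀ k : Nat, k < t0.length →
      (P.foldl (pvStepT clusters) t0).getD k 0 =
        t0.getD k 0 + ((P.filter (fun p => p.1 = (k : Int))).map (fun p => pvClus clusters p.2)).sum := by
  induction P with
  | nil => intro t0 _; simp
  | cons p P ih =>
    intro t0 hP
    obtain ⟨hp0, hp1⟩ := hP p (List.mem_cons_self ..)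
    have hlt : p.1.toNat < t0.length := by omega
    have hcast : ((p.1.toNat : Nat) : Int) = p.1 := Int.toNat_of_nonneg hp0
    have hset : pvStepT clusters t0 p = t0.set p.1.toNat (t0.getD p.1.toNat 0 + pvClus clusters p.2) := by
      simp only [pvStepT, PySem.List.pySetD, PySem.List.pyGetD]
      rw [← hcast]
      rw [PySem.List.pySet?_natCast (h := hlt)]
      simp only [Option.getD_some]
      congr 1
      simp only [List.getD_eq_getElem?_getD, Int.toNat_natCast]
      rw [PySem.List.pyGet?_natCast]
    have hlen : (pvStepT clusters t0 p).length = t0.length := by rw [hset]; simp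
    obtain ⟨ha, hb⟩ := ih (pvStepT clusters t0 p)
      (by rw [hlen]; intro q hq; exact hP q (List.mem_cons_of_mem _ hq))
    simp only [List.foldl_cons]
    refine ⟨by rw [ha, hlen], ?_⟩
    intro k hk
    rw [hb k (by rw [hlen]; exact hk)]
    have hgetset : (pvStepT clusters t0 p).getD k 0 =
        if p.1 = (k : Int) then t0.getD k 0 + pvClus clusters p.2 else t0.getD k 0 := by
      rw [hset]
      by_cases he : p.1.toNat = k
      · rw [if_pos (by omega)]
        subst he
        simp [List.getD_eq_getElem?_getD, List.getElem?_set_self (by omega)]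
      · rw [if_neg (by omega)]
        simp [List.getD_eq_getElem?_getD, List.getElem?_set_ne (by omega)]
    rw [hgetset, List.filter_cons]
    by_cases he : p.1 = (k : Int)
    · simp only [he, decide_true, if_pos, List.map_cons, List.sum_cons]
      ring
    · rw [if_neg he, if_neg (by simpa using he)]

-- nodup list summed as a Finset
theorem pv_sum_nodup (f : Int → Int) (L : List Int) (hL : L.Nodup) :
    (L.map f).sum = ∑ v ∈ L.toFinset, f v := by
  induction L with
  | nil => simp
  | cons x L ih =>
    rcases List.nodup_cons.mp hL with ⟨hx, hL'⟩
    rw [List.map_cons, List.sum_cons, List.toFinset_cons,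
      Finset.sum_insert (by simpa using hx), ih hL']

-- A's per-column loop computes pvS
theorem pvA_col (clusters : List Int) (cm : List (List Int)) (n col : Int) :
    ((PySem.List.pyRange 0 n 1).foldl (pvStepA clusters cm col)
      ((PySem.Set.empty : PySem.Set Int), 0)).2 = pvS clusters cm n col := by
  obtain ⟨-, -, hc⟩ := pvA_inner clusters cm col (PySem.List.pyRange 0 n 1)
    (PySem.Set.empty : PySem.Set Int) 0 List.nodup_nil
  rw [hc]
  simp [pvS, pvColFS, PySem.Set.empty]

-- B's totals list is the per-column pvS table
theorem pvB_totals_eq (clusters : List Int) (cm : List (List Int)) (n : Int) (Mnat : Nat) :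
    ((PySem.List.pyRange 0 n 1).foldl (fun s row =>
        (PySem.List.pyRange 0 (Mnat : Int) 1).foldl (pvStepB cm row) s)
        (PySem.Set.empty : PySem.Set (Int × Int))).foldl (pvStepT clusters) (List.replicate Mnat 0)
      = (PySem.List.pyRange 0 (Mnat : Int) 1).map (fun c => pvS clusters cm n c) := by
  set occ := (PySem.List.pyRange 0 n 1).foldl (fun s row =>
      (PySem.List.pyRange 0 (Mnat : Int) 1).foldl (pvStepB cm row) s)
      (PySem.Set.empty : PySem.Set (Int × Int)) with hocc
  have hOccMem : ∀ q : Int × Int, q ∈ occ ↔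
      (q.1 ∈ PySem.List.pyRange 0 (Mnat : Int) 1 ∧ q.2 ≠ -1 ∧
        ∃ r ∈ PySem.List.pyRange 0 n 1, pvCell cm r q.1 = q.2) := by
    intro q
    rw [hocc, pvB_occ_mem]
    simp [PySem.Set.empty]
  have hOccNodup : occ.Nodup :=
    pvB_occ_nodup cm (PySem.List.pyRange 0 (Mnat : Int) 1) (PySem.List.pyRange 0 n 1) _ List.nodup_nil
  have hP : ∀ p ∈ occ, 0 ≤ p.1 ∧ p.1 < ((List.replicate Mnat (0 : Int)).length : Int) := by
    intro p hp
    have := (hOccMem p).mp hp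
    have h1 := PySem.List.mem_pyRange_one.mp this.1
    simp only [List.length_replicate]
    omega
  obtain ⟨hlen, hval⟩ := pvB_totals clusters occ (List.replicate Mnat 0) hP
  have hCol : ∀ k : Nat, k < Mnat →
      ((occ.filter (fun p => p.1 = (k : Int))).map (fun p => pvClus clusters p.2)).sum
        = pvS clusters cm n (k : Int) := by
    intro k hk
    have hmap : (occ.filter (fun p => p.1 = (k : Int))).map (fun p => pvClus clusters p.2)
        = ((occ.filter (fun p => p.1 = (k : Int))).map Prod.snd).map (pvClus clusters) := by
      rw [List.map_map]; rfl
    have hnd : ((occ.filter (fun p => p.1 = (k : Int))).map Prod.snd).Nodup := by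
      refine List.Nodup.map_on ?_ (hOccNodup.filter _)
      intro x hx y hy hxy
      have hx1 : x.1 = (k : Int) := by simpa using (List.mem_filter.mp hx).2
      have hy1 : y.1 = (k : Int) := by simpa using (List.mem_filter.mp hy).2
      exact Prod.ext_iff.mpr ⟨hx1.trans hy1.symm, hxy⟩
    have hfs : ((occ.filter (fun p => p.1 = (k : Int))).map Prod.snd).toFinset
        = pvColFS cm n (k : Int) := by
      ext v
      simp only [List.mem_toFinset, List.mem_map, List.mem_filter, pvColFS]
      constructor
      · rintro ⟨p, ⟨hpo, hp1⟩, rfl⟩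
        have hm := (hOccMem p).mp hpo
        obtain ⟨-, h2, r, hr, h3⟩ := hm
        have : p.1 = (k : Int) := by simpa using hp1
        rw [this] at h3
        exact ⟨⟨r, hr, h3⟩, by simpa using h2⟩
      · intro hv
        obtain ⟨⟨r, hr, h3⟩, h2⟩ := hv
        refine ⟨((k : Int), v), ⟨(hOccMem _).mpr ⟨?_, by simpa using h2, r, hr, h3⟩, by simp⟩, rfl⟩
        exact PySem.List.mem_pyRange_one.mpr ⟨by simp, by simp; exact_mod_cast hk⟩
    rw [hmap, pv_sum_nodup _ _ hnd, hfs, pvS]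
  refine List.ext_getElem ?_ ?_
  · rw [hlen]
    simp [PySem.List.length_pyRange_one]
  · intro i h1 h2
    have hiM : i < Mnat := by rw [hlen] at h1; simpa using h1
    have hgetD : (occ.foldl (pvStepT clusters) (List.replicate Mnat 0)).getD i 0
        = (occ.foldl (pvStepT clusters) (List.replicate Mnat 0))[i] := by
      exact List.getD_eq_getElem _ _ h1
    rw [← hgetD, hval i (by simpa using hiM)]
    rw [List.getD_replicate, hCol i hiM]
    simp [PySem.List.getElem_pyRange_one]
    · exact hiM

-- ===== VERDICT (by name: the statement is the Claim_ definition above) =====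
theorem calculate_oil_by_column_spec : Claim_equal_calculate_oil_by_column := by
  intro land clusters cmap _ _
  unfold Spec_calculate_oil_by_column
  simp only [calculate_oil_by_column, calculate_oil_by_column_alt]
  rw [Int.toNat_natCast]
  rw [pvB_totals_eq clusters cmap (land.length : Int) (land.headD []).length]
  have hmax : PySem.List.max? ([0] ++ (PySem.List.pyRange 0 ((land.headD []).length : Int) 1).map
        (fun c => pvS clusters cmap (land.length : Int) c)) (fun x => x)
      = some (((PySem.List.pyRange 0 ((land.headD []).length : Int) 1).map
        (fun c => pvS clusters cmap (land.length : Int) c)).foldl max 0) := by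
    exact PySem.List.max?_id_cons ..
  rw [hmax, Option.getD_some, List.foldl_map]
  exact PySem.List.foldl_congr_mem _ _ _ _ (fun acc col _ => by rw [pvA_col])
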